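-- pv_equiv track=rewrite | github.com/donkz/rtcwprostats | lambdas/postprocessing/gamelog/gamelog_process/gamelog_calc.py | prepare_playerinfo_list
-- ===== SOURCE A (Python) =====
-- def prepare_playerinfo_list(potential_achievements, top_feuds, sk):
--     """Make a list of guids to retrieve from ddb."""
--     item_list = []
--     unique_guids = {}
--     for achievement, achievement_table in potential_achievements.items():
--         for guid, player_stats in achievement_table.items():
--             if {"pk": "player#" + guid, "sk": sk} not in item_list:
--                 item_list.append({"pk": "player#" + guid, "sk": sk})
--                 unique_guids[guid] = 1
--
--     for feud in top_feuds:
--         if feud[0] not in unique_guids: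
--             item_list.append({"pk": "player#" + feud[0], "sk": sk})
--             unique_guids[feud[0]] = 1
--         if feud[1] not in unique_guids:
--             item_list.append({"pk": "player#" + feud[1], "sk": sk})
--             unique_guids[feud[1]] = 1
--     return item_list
-- ===== SOURCE B (Python) =====
-- def prepare_playerinfo_list(potential_achievements, top_feuds, sk):
--     """Make a list of guids to retrieve from ddb."""
--     all_guids = [guid for achievement_table in potential_achievements.values()
--                  for guid in achievement_table.keys()]
--     for feud in top_feuds:
--         all_guids.append(feud[0])
--         all_guids.append(feud[1])
--     return [{"pk": "player#" + guid, "sk": sk} for guid in dict.fromkeys(all_guids)]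
-- ===== Notes on version B (the rewrite author's own statement) =====
-- stated objective: faster
-- what changed: Replaces the interleaved append-if-unseen loop carrying two parallel structures (item_list and a unique_guids dict) with a gather-then-dedup-then-map pipeline: flatten all guids into one list, dedup with dict.fromkeys preserving first occurrence, then map each guid to its ddb key.
import Mathlib
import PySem

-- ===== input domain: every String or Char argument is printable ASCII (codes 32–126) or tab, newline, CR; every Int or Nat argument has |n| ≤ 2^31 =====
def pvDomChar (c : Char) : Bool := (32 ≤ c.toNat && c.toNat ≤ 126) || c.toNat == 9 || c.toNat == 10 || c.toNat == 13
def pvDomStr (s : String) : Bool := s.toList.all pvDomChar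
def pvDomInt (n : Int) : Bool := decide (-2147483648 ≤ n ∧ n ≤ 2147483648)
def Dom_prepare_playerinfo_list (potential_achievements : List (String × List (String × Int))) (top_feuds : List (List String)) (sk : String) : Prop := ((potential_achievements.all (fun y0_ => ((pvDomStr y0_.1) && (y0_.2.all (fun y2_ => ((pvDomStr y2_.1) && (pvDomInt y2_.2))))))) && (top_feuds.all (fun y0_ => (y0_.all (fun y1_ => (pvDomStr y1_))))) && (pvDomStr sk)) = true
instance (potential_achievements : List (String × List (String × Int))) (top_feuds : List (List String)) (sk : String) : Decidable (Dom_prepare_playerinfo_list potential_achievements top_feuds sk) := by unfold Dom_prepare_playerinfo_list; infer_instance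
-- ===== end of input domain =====

-- B replaces A's interleaved append-if-unseen loop (maintaining item_list and a unique_guids
-- dict in parallel) with a gather-then-dedup-then-map pipeline
-- (objective: faster — A's 'item not in item_list' scan is quadratic, B's dedup is hash-based).

-- ===== PORT A =====
-- A's loop state: (item_list, unique_guids).  The inner achievement loop appends and
-- records a guid only if its item dict is not yet in item_list.
def pvStepA1 (sk : String) (st : List (List (String × String)) × PySem.Dict String Int)
    (gp : String × Int) : List (List (String × String)) × PySem.Dict String Int :=
  if [("pk", "player#" ++ gp.1), ("sk", sk)] ∈ st.1 then st
  else (st.1 ++ [[("pk", "player#" ++ gp.1), ("sk", sk)]], st.2.insert gp.1 1)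

-- The feud loop: feud[0] / feud[1] are pyGet? (none = IndexError, excluded by Pre_);
-- each is appended if its guid is not in unique_guids.
def pvStepA2 (sk : String) (st : List (List (String × String)) × PySem.Dict String Int)
    (feud : List String) : List (List (String × String)) × PySem.Dict String Int :=
  match PySem.List.pyGet? feud 0, PySem.List.pyGet? feud 1 with
  | some f0, some f1 =>
      let st := if st.2.contains f0 then st
                else (st.1 ++ [[("pk", "player#" ++ f0), ("sk", sk)]], st.2.insert f0 1)
      if st.2.contains f1 then st
      else (st.1 ++ [[("pk", "player#" ++ f1), ("sk", sk)]], st.2.insert f1 1)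
  | _, _ => st

def prepare_playerinfo_list (potential_achievements : List (String × List (String × Int))) (top_feuds : List (List String)) (sk : String) : List (List (String × String)) :=
  (top_feuds.foldl (pvStepA2 sk)
    (potential_achievements.foldl (fun st ap => ap.2.foldl (pvStepA1 sk) st)
      ([], PySem.Dict.empty))).1

-- ===== PORT B =====
-- gather feud guids: all_guids.append(feud[0]); all_guids.append(feud[1])
def pvStepB2 (acc : List String) (feud : List String) : List String :=
  match PySem.List.pyGet? feud 0, PySem.List.pyGet? feud 1 with
  | some f0, some f1 => acc ++ [f0] ++ [f1]
  | _, _ => acc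

def prepare_playerinfo_list_alt (potential_achievements : List (String × List (String × Int))) (top_feuds : List (List String)) (sk : String) : List (List (String × String)) :=
  -- all_guids = [guid for table in potential_achievements.values() for guid in table.keys()]
  -- then the feud loop, then dict.fromkeys dedup (= PySem.List.dedup), then the final map.
  (PySem.List.dedup
      (top_feuds.foldl pvStepB2
        (potential_achievements.flatMap (fun achievement_table => achievement_table.2.map Prod.fst)))).map
    (fun guid => [("pk", "player#" ++ guid), ("sk", sk)])

-- ===== PRECONDITION & SPEC =====
-- Pre_ excludes only inputs where A raises: a feud with fewer than two entries makes
-- feud[0] / feud[1] an IndexError (B raises there too).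
def Pre_prepare_playerinfo_list (potential_achievements : List (String × List (String × Int))) (top_feuds : List (List String)) (sk : String) : Prop :=
  ∀ feud ∈ top_feuds, 2 ≤ feud.length
instance (potential_achievements : List (String × List (String × Int))) (top_feuds : List (List String)) (sk : String) : Decidable (Pre_prepare_playerinfo_list potential_achievements top_feuds sk) := by unfold Pre_prepare_playerinfo_list; infer_instance

def pvWitness_prepare_playerinfo_list : (List (String × List (String × Int))) × List (List String) × String :=
  ([("ach", [("g1", 1), ("g2", 2)])], ([["g1", "g3"]], "playerinfo"))

def Spec_prepare_playerinfo_list (potential_achievements : List (String × List (String × Int))) (top_feuds : List (List String)) (sk : String) (out : List (List (String × String))) : Prop := out = prepare_playerinfo_list_alt potential_achievements top_feuds sk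
instance (potential_achievements : List (String × List (String × Int))) (top_feuds : List (List String)) (sk : String) (out : List (List (String × String))) : Decidable (Spec_prepare_playerinfo_list potential_achievements top_feuds sk out) := by unfold Spec_prepare_playerinfo_list; infer_instance

-- ===== CLAIM (what is proved, stated in full; the proofs are below) =====
def Claim_equal_prepare_playerinfo_list : Prop := ∀ (potential_achievements : List (String × List (String × Int))) (top_feuds : List (List String)) (sk : String), Dom_prepare_playerinfo_list potential_achievements top_feuds sk → Pre_prepare_playerinfo_list potential_achievements top_feuds sk → Spec_prepare_playerinfo_list potential_achievements top_feuds sk (prepare_playerinfo_list potential_achievements top_feuds sk)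

-- ===== LEMMAS AND PROOFS =====

-- the ddb key dict built for a guid
def pvItem (sk guid : String) : List (String × String) := [("pk", "player#" ++ guid), ("sk", sk)]

-- the unique_guids dict after recording the guids of S (in order)
def pvDictOf (S : List String) : PySem.Dict String Int :=
  S.foldl (fun d g => d.insert g 1) PySem.Dict.empty

-- A's abstract loop state determined by the ordered set S of guids seen so far
def pvSt (sk : String) (S : List String) : List (List (String × String)) × PySem.Dict String Int :=
  (S.map (pvItem sk), pvDictOf S)

theorem pvItem_inj (sk : String) : Function.Injective (pvItem sk) := by
  intro a b h
  simp only [pvItem, List.cons.injEq, Prod.mk.injEq, and_true, true_and] at h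
  have h' : ("player#" ++ a).toList = ("player#" ++ b).toList := by rw [h]
  simp only [String.toList_append] at h'
  exact String.toList_injective (List.append_cancel_left h')

theorem pvDictOf_append (S : List String) (g : String) :
    pvDictOf (S ++ [g]) = (pvDictOf S).insert g 1 := by
  simp [pvDictOf, List.foldl_append]

theorem pvDictOf_contains (S : List String) (g : String) :
    (pvDictOf S).contains g = true ↔ g ∈ S := by
  rw [PySem.Dict.contains_iff_mem_keys]
  rw [pvDictOf, PySem.Dict.keys_foldl_insert S (fun _ _ => 1) PySem.Dict.empty]
  simp [PySem.Dict.keys_empty]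

theorem pvAdd_of_mem {S : List String} {g : String} (h : g ∈ S) : PySem.Set.add S g = S := by
  simp [PySem.Set.add, PySem.Set.contains, h]

theorem pvAdd_of_not_mem {S : List String} {g : String} (h : ¬ g ∈ S) :
    PySem.Set.add S g = S ++ [g] := by
  simp [PySem.Set.add, PySem.Set.contains, h]

-- one dict-contains guarded append step (the shape of both feud branches)
theorem pvStep_dict (sk : String) (S : List String) (g : String) :
    (if (pvDictOf S).contains g
      then (S.map (pvItem sk), pvDictOf S)
      else (S.map (pvItem sk) ++ [[("pk", "player#" ++ g), ("sk", sk)]], (pvDictOf S).insert g 1))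
    = pvSt sk (PySem.Set.add S g) := by
  by_cases h : g ∈ S
  · rw [if_pos ((pvDictOf_contains S g).2 h), pvAdd_of_mem h, pvSt]
  · rw [if_neg (by simp [pvDictOf_contains, h]), pvAdd_of_not_mem h, pvSt,
      pvDictOf_append, List.map_append]
    rfl

-- pvStep_dict restated on the syntactic shape the unfolded pvStepA2 produces
theorem pvStep_dict' (sk : String) (S : List String) (g : String) :
    (if (pvSt sk S).2.contains g then pvSt sk S
      else ((pvSt sk S).1 ++ [[("pk", "player#" ++ g), ("sk", sk)]], (pvSt sk S).2.insert g 1))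
    = pvSt sk (PySem.Set.add S g) := pvStep_dict sk S g

theorem pvStepA1_st (sk : String) (S : List String) (gp : String × Int) :
    pvStepA1 sk (pvSt sk S) gp = pvSt sk (PySem.Set.add S gp.1) := by
  rw [pvStepA1]
  split_ifs with hc
  · have h : gp.1 ∈ S := by
      obtain ⟨a, ha, he⟩ := List.mem_map.1 hc
      exact (pvItem_inj sk (he : pvItem sk a = pvItem sk gp.1)) ▸ ha
    rw [pvAdd_of_mem h]
  · have h : ¬ gp.1 ∈ S := fun h =>
      hc (List.mem_map_of_mem (f := pvItem sk) h)
    rw [pvAdd_of_not_mem h]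
    show (S.map (pvItem sk) ++ [pvItem sk gp.1], (pvDictOf S).insert gp.1 1) = _
    rw [pvSt, pvDictOf_append, List.map_append]
    rfl

theorem pvStepA2_st (sk : String) (S : List String) (feud : List String)
    (h : 2 ≤ feud.length) :
    pvStepA2 sk (pvSt sk S) feud
      = pvSt sk (PySem.Set.add (PySem.Set.add S feud[0]) feud[1]) := by
  have h0 : PySem.List.pyGet? feud 0 = some feud[0] := by
    have := PySem.List.pyGet?_natCast (xs := feud) (n := 0)
    simp only [Nat.cast_zero] at this
    rw [this]; exact List.getElem?_eq_getElem (by omega)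
  have h1 : PySem.List.pyGet? feud 1 = some feud[1] := by
    have := PySem.List.pyGet?_natCast (xs := feud) (n := 1)
    simp only [Nat.cast_one] at this
    rw [this]; exact List.getElem?_eq_getElem (by omega)
  rw [pvStepA2, h0, h1]
  simp only []
  rw [pvStep_dict' sk S feud[0]]
  exact pvStep_dict' sk (PySem.Set.add S feud[0]) feud[1]

-- generic: a fold whose step commutes with pvSt stays in pvSt form
theorem pvFoldl_st {β : Type} (sk : String)
    (step : List (List (String × String)) × PySem.Dict String Int → β →
            List (List (String × String)) × PySem.Dict String Int)
    (g : List String → β → List String)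
    (hstep : ∀ S b, step (pvSt sk S) b = pvSt sk (g S b)) :
    ∀ (l : List β) (S : List String), l.foldl step (pvSt sk S) = pvSt sk (l.foldl g S) := by
  intro l
  induction l with
  | nil => intro S; rfl
  | cons b l ih => intro S; simp only [List.foldl_cons, hstep]; exact ih _

-- phase 1 at the Set level equals B's flat gather
theorem pvPhase1 (pa : List (String × List (String × Int))) :
    ∀ acc : List String,
      pa.foldl (fun S ap => ap.2.foldl (fun S gp => PySem.Set.add S gp.1) S)
        (PySem.Set.ofList acc)
      = PySem.Set.ofList (acc ++ pa.flatMap (fun ap => ap.2.map Prod.fst)) := by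
  induction pa with
  | nil => intro acc; simp
  | cons ap pa ih =>
    intro acc
    have hin : ap.2.foldl (fun S gp => PySem.Set.add S gp.1) (PySem.Set.ofList acc)
        = PySem.Set.ofList (acc ++ ap.2.map Prod.fst) := by
      rw [PySem.Set.ofList_eq_foldl, PySem.Set.ofList_eq_foldl, List.foldl_append,
        List.foldl_map]
    simp only [List.foldl_cons, hin, ih, List.flatMap_cons, List.append_assoc]

-- A's per-feud step at the Set level
def pvG2 (S : List String) (feud : List String) : List String :=
  match PySem.List.pyGet? feud 0, PySem.List.pyGet? feud 1 with
  | some f0, some f1 => PySem.Set.add (PySem.Set.add S f0) f1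
  | _, _ => S

theorem pvGet0 (feud : List String) (h : 2 ≤ feud.length) :
    PySem.List.pyGet? feud 0 = some (feud[0]'(by omega)) := by
  have := PySem.List.pyGet?_natCast (xs := feud) (n := 0)
  simp only [Nat.cast_zero] at this
  rw [this]; exact List.getElem?_eq_getElem (by omega)

theorem pvGet1 (feud : List String) (h : 2 ≤ feud.length) :
    PySem.List.pyGet? feud 1 = some (feud[1]'(by omega)) := by
  have := PySem.List.pyGet?_natCast (xs := feud) (n := 1)
  simp only [Nat.cast_one] at this
  rw [this]; exact List.getElem?_eq_getElem (by omega)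

theorem pvStepA2_st' (sk : String) (S : List String) (feud : List String)
    (h : 2 ≤ feud.length) :
    pvStepA2 sk (pvSt sk S) feud = pvSt sk (pvG2 S feud) := by
  rw [pvStepA2_st sk S feud h]
  simp only [pvG2, pvGet0 feud h, pvGet1 feud h]
  rfl

-- a fold whose step commutes with pvSt on the list's members stays in pvSt form
theorem pvFoldl_st_mem {β : Type} (sk : String)
    (step : List (List (String × String)) × PySem.Dict String Int → β →
            List (List (String × String)) × PySem.Dict String Int)
    (g : List String → β → List String) :
    ∀ (l : List β), (∀ b ∈ l, ∀ S, step (pvSt sk S) b = pvSt sk (g S b)) →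
      ∀ S : List String, l.foldl step (pvSt sk S) = pvSt sk (l.foldl g S) := by
  intro l
  induction l with
  | nil => intro _ S; rfl
  | cons b l ih =>
    intro h S
    simp only [List.foldl_cons, h b (by simp)]
    exact ih (fun b hb => h b (by simp [hb])) _

theorem pvOfList_append2 (acc : List String) (a b : String) :
    PySem.Set.ofList (acc ++ [a] ++ [b])
      = PySem.Set.add (PySem.Set.add (PySem.Set.ofList acc) a) b := by
  rw [PySem.Set.ofList_eq_foldl, PySem.Set.ofList_eq_foldl, List.foldl_append,
    List.foldl_append]
  rfl

-- phase 2 at the Set level equals B's feud gather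
theorem pvPhase2 : ∀ (tf : List (List String)), (∀ f ∈ tf, 2 ≤ f.length) →
    ∀ acc : List String,
      tf.foldl pvG2 (PySem.Set.ofList acc)
      = PySem.Set.ofList (tf.foldl pvStepB2 acc) := by
  intro tf
  induction tf with
  | nil => intro _ acc; rfl
  | cons f tf ih =>
    intro h acc
    have hf : 2 ≤ f.length := h f (by simp)
    have hb : pvStepB2 acc f = acc ++ [f[0]] ++ [f[1]] := by
      rw [pvStepB2]
      simp only [pvGet0 f hf, pvGet1 f hf]
      rfl
    have ha : pvG2 (PySem.Set.ofList acc) f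
        = PySem.Set.add (PySem.Set.add (PySem.Set.ofList acc) f[0]) f[1] := by
      rw [pvG2]
      simp only [pvGet0 f hf, pvGet1 f hf]
      rfl
    simp only [List.foldl_cons, hb, ha, ← pvOfList_append2]
    exact ih (fun g hg => h g (by simp [hg])) _

-- ===== VERDICT (by name: the statement is the Claim_ definition above) =====
theorem prepare_playerinfo_list_spec : Claim_equal_prepare_playerinfo_list := by
  intro pa tf sk _ hpre
  show prepare_playerinfo_list pa tf sk = prepare_playerinfo_list_alt pa tf sk
  rw [prepare_playerinfo_list, prepare_playerinfo_list_alt]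
  have e1 : pa.foldl (fun st ap => ap.2.foldl (pvStepA1 sk) st) (pvSt sk [])
      = pvSt sk (PySem.Set.ofList (pa.flatMap (fun ap => ap.2.map Prod.fst))) := by
    rw [pvFoldl_st sk _ (fun S ap => ap.2.foldl (fun S gp => PySem.Set.add S gp.1) S)
      (fun S ap => pvFoldl_st sk _ _ (fun S gp => pvStepA1_st sk S gp) ap.2 S) pa []]
    rw [show ([] : List String) = PySem.Set.ofList [] from rfl, pvPhase1 pa []]
    rw [List.nil_append]
  have e2 : tf.foldl (pvStepA2 sk)
        (pvSt sk (PySem.Set.ofList (pa.flatMap (fun ap => ap.2.map Prod.fst))))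
      = pvSt sk (PySem.Set.ofList
          (tf.foldl pvStepB2 (pa.flatMap (fun ap => ap.2.map Prod.fst)))) := by
    rw [pvFoldl_st_mem sk _ pvG2 tf (fun f hf S => pvStepA2_st' sk S f (hpre f hf)) _]
    rw [pvPhase2 tf hpre _]
  show (tf.foldl (pvStepA2 sk)
    (pa.foldl (fun st ap => ap.2.foldl (pvStepA1 sk) st) (pvSt sk []))).1 = _
  rw [e1, e2]
  rw [PySem.List.dedup_eq_ofList]
  rfl
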